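-- pv_equiv track=rewrite | github.com/nortikin/sverchok | utils/topo.py | sort_by_incidence
-- ===== SOURCE A (Python) =====
-- from collections import defaultdict
--
-- def sort_by_incidence(vertices, edges):
--     incidence = defaultdict(lambda: 0)
--     for i, j in edges:
--         incidence[i] += 1
--         incidence[j] += 1
--
--     indicies = list(range(len(vertices)))
--     indicies.sort(key = lambda i: incidence[i])
--
--     reverse_index = dict()
--     vertices_out = []
--     for new_index, old_index in enumerate(indicies):
--         reverse_index[old_index] = new_index
--         vertices_out.append(vertices[old_index])
--
--     edges_out = []
--     for i, j in edges:
--         edges_out.append((reverse_index[i], reverse_index[j]))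
--
--     return vertices_out, edges_out
-- ===== SOURCE B (Python) =====
-- def sort_by_incidence(vertices, edges):
--     n = len(vertices)
--     deg = [0] * n
--     for i, j in edges:
--         deg[i] += 1
--         deg[j] += 1
--     # stable counting/bucket sort on integer degrees (degree <= 2*len(edges))
--     buckets = [[] for _ in range(2 * len(edges) + 1)]
--     for idx in range(n):
--         buckets[deg[idx]].append(idx)
--     order = [idx for b in buckets for idx in b]
--     rev = [0] * n
--     for new, old in enumerate(order):
--         rev[old] = new
--     vertices_out = [vertices[old] for old in order]
--     edges_out = [(rev[i], rev[j]) for i, j in edges]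
--     return vertices_out, edges_out
-- ===== Notes on version B (the rewrite author's own statement) =====
-- stated objective: faster
-- what changed: Replaces the comparison sort on the incidence-dict key with a stable counting/bucket sort over a degree array (degrees are bounded by 2*len(edges)), and replaces the reverse-index dict with a flat integer array.
import Mathlib
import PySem

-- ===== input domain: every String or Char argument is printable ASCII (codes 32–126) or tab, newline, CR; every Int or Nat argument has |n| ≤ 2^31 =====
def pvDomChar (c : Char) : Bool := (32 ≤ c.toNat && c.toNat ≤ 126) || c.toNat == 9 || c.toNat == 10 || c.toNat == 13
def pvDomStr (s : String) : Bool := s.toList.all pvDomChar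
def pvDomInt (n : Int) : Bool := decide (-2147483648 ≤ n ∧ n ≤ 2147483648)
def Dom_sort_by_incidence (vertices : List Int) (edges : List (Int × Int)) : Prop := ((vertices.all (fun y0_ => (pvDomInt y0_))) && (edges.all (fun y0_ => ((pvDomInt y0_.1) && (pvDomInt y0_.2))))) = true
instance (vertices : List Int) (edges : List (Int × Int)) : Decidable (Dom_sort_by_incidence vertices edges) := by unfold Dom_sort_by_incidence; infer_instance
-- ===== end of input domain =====

-- B replaces A's comparison sort keyed on an incidence dict by a stable counting/bucket
-- sort over a degree array (O(V + E) instead of O(V log V + E); measured faster by the timing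
-- run); equivalence of the returned value is proved on Pre_ (all edge endpoints are valid
-- vertex indices — exactly the inputs where A returns instead of raising KeyError).

-- ===== PORT A =====
-- incidence[i] += 1 on a defaultdict(0) is d.insert i (d.getD i 0 + 1); the key lambda's
-- incidence[i] reads the same value as getD i 0 (the defaultdict default is 0).
def sort_by_incidence (vertices : List Int) (edges : List (Int × Int)) : List Int × (List (Int × Int)) :=
  let incidence : PySem.Dict Int Int :=
    edges.foldl (fun d p =>
      let d1 := d.insert p.1 (d.getD p.1 0 + 1)
      d1.insert p.2 (d1.getD p.2 0 + 1)) PySem.Dict.empty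
  let indicies := PySem.List.sorted (PySem.List.pyRange 0 (vertices.length : Int) 1)
                    (fun i => incidence.getD i 0) false
  -- vertices[old_index]: old_index ∈ range(len(vertices)), so pyGetD is exact here;
  -- reverse_index[i] raises KeyError unless 0 ≤ i < len(vertices): Pre_ admits exactly those inputs.
  let st := (PySem.List.enumerate indicies 0).foldl
      (fun (st : PySem.Dict Int Int × List Int) p =>
        (st.1.insert p.2 p.1, st.2 ++ [PySem.List.pyGetD vertices p.2 0])) (PySem.Dict.empty, [])
  let edges_out := edges.foldl (fun eo p => eo ++ [(st.1.getD p.1 0, st.1.getD p.2 0)]) []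
  (st.2, edges_out)

-- ===== PORT B =====
-- deg[i] += 1 / rev[old] = new are pySetD; under Pre_ every index used is in range, where
-- pySetD/pyGetD agree exactly with Python list indexing.
def sort_by_incidence_alt (vertices : List Int) (edges : List (Int × Int)) : List Int × (List (Int × Int)) :=
  let n := vertices.length
  let deg : List Int :=
    edges.foldl (fun dg p =>
      let dg1 := PySem.List.pySetD dg p.1 (PySem.List.pyGetD dg p.1 0 + 1)
      PySem.List.pySetD dg1 p.2 (PySem.List.pyGetD dg1 p.2 0 + 1)) (List.replicate n (0 : Int))
  let buckets : List (List Int) :=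
    (PySem.List.pyRange 0 (n : Int) 1).foldl (fun bs k =>
      let dk := PySem.List.pyGetD deg k 0
      PySem.List.pySetD bs dk (PySem.List.pyGetD bs dk [] ++ [k]))
      (List.replicate (2 * edges.length + 1) ([] : List Int))
  let order := buckets.flatMap id
  let rev : List Int :=
    (PySem.List.enumerate order 0).foldl (fun r p => PySem.List.pySetD r p.2 p.1)
      (List.replicate n (0 : Int))
  let vertices_out := order.map (fun oi => PySem.List.pyGetD vertices oi 0)
  let edges_out := edges.map (fun p => (PySem.List.pyGetD rev p.1 0, PySem.List.pyGetD rev p.2 0))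
  (vertices_out, edges_out)

-- ===== PRECONDITION & SPEC =====
-- Pre_: every edge endpoint is a valid vertex index; outside this A raises KeyError
-- (reverse_index only has keys range(len(vertices))), so Pre_ is exactly A's domain.
def Pre_sort_by_incidence (vertices : List Int) (edges : List (Int × Int)) : Prop :=
  ∀ p ∈ edges, 0 ≤ p.1 ∧ p.1 < (vertices.length : Int) ∧ 0 ≤ p.2 ∧ p.2 < (vertices.length : Int)
instance (vertices : List Int) (edges : List (Int × Int)) : Decidable (Pre_sort_by_incidence vertices edges) := by unfold Pre_sort_by_incidence; infer_instance
def pvWitness_sort_by_incidence : List Int × (List (Int × Int)) := ([10, 20, 30], [(0, 1), (1, 2)])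

def Spec_sort_by_incidence (vertices : List Int) (edges : List (Int × Int)) (out : List Int × (List (Int × Int))) : Prop := out = sort_by_incidence_alt vertices edges
instance (vertices : List Int) (edges : List (Int × Int)) (out : List Int × (List (Int × Int))) : Decidable (Spec_sort_by_incidence vertices edges out) := by unfold Spec_sort_by_incidence; infer_instance

-- ===== CLAIM (what is proved, stated in full; the proofs are below) =====
def Claim_equal_sort_by_incidence : Prop := ∀ (vertices : List Int) (edges : List (Int × Int)), Dom_sort_by_incidence vertices edges → Pre_sort_by_incidence vertices edges → Spec_sort_by_incidence vertices edges (sort_by_incidence vertices edges)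

-- ===== LEMMAS AND PROOFS =====

def pvEnds (edges : List (Int × Int)) : List Int := edges.flatMap (fun p => [p.1, p.2])
theorem pv_incidence_getD (edges : List (Int × Int)) (d : PySem.Dict Int Int) (v : Int) :
    (edges.foldl (fun d p =>
      let d1 := d.insert p.1 (d.getD p.1 0 + 1)
      d1.insert p.2 (d1.getD p.2 0 + 1)) d).getD v 0
    = d.getD v 0 + ((pvEnds edges).count v : Int) := by
  induction edges generalizing d with
  | nil => simp [pvEnds]
  | cons p t ih =>
    simp only [List.foldl_cons, ih, pvEnds, List.flatMap_cons, List.count_append]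
    simp only [PySem.Dict.getD_insert]
    by_cases h1 : v = p.2 <;> by_cases h2 : v = p.1 <;> by_cases h3 : p.2 = p.1 <;>
      simp only [h1, h2, h3, if_true, if_false, List.count_cons, List.count_nil, if_pos rfl,
        beq_iff_eq, reduceIte] <;>
      simp_all [List.count_cons] <;> push_cast <;> omega
theorem pv_deg_eq (n : Nat) (l : List Int) (hl : ∀ x ∈ l, 0 ≤ x ∧ x < (n : Int)) :
    l.foldl (fun dg x => PySem.List.pySetD dg x (PySem.List.pyGetD dg x 0 + 1))
      (List.replicate n (0 : Int))
    = (PySem.List.pyRange 0 (n : Int) 1).map (fun k => (l.count k : Int)) := by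
  induction l using List.reverseRecOn with
  | nil =>
    apply List.ext_getElem
    · simp [PySem.List.length_pyRange_one]
    · intro i h1 h2
      simp only [List.getElem_replicate, List.getElem_map,
        PySem.List.getElem_pyRange_one, List.count_nil, Int.ofNat_eq_natCast, Nat.cast_ofNat]
      simp
  | append_singleton t x ih =>
    have hx := hl x (by simp)
    have ht : ∀ y ∈ t, 0 ≤ y ∧ y < (n : Int) := fun y hy => hl y (by simp [hy])
    rw [List.foldl_append, ih ht]
    have hnn : (0:Int) ≤ x := hx.1
    have hxn : x.toNat < n := by omega
    have hlen : ((PySem.List.pyRange 0 (n:Int) 1).map (fun k => ((t.count k) : Int))).length = n := by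
      simp [PySem.List.length_pyRange_one]
    rw [List.foldl_cons, List.foldl_nil, PySem.List.pySetD_of_nonneg _ _ hnn,
      PySem.List.pyGetD_eq_getElem _ _ hnn (by rw [hlen]; exact_mod_cast hx.2)]
    apply List.ext_getElem
    · simp [PySem.List.length_pyRange_one]
    · intro i h1 h2
      have hi : i < n := by
        simpa [PySem.List.length_pyRange_one] using h2
      simp only [List.getElem_set, List.getElem_map,
        PySem.List.getElem_pyRange_one, zero_add]
      have hcnt : ∀ k : Int, (t ++ [x]).count k = t.count k + if k = x then 1 else 0 := by
        intro k
        simp only [List.count_append, List.count_cons, List.count_nil, beq_iff_eq]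
        rcases eq_or_ne k x with hk | hk
        · subst hk; simp
        · simp [hk, hk.symm]
      split_ifs with h
      · subst h
        have hxx : ((x.toNat : Nat) : Int) = x := Int.toNat_of_nonneg hnn
        rw [hxx, hcnt]
        simp
      · have hne : ¬ ((i : Int) = x) := fun hc => h (by omega)
        rw [hcnt]
        simp [hne]

-- two-pointwise fold = fold over the flattened endpoint list
theorem pv_fold_pair {α : Type} (edges : List (Int × Int)) (f : α → Int → α) (a : α) :
    edges.foldl (fun a p => f (f a p.1) p.2) a = (pvEnds edges).foldl f a := by
  induction edges generalizing a with
  | nil => rfl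
  | cons p t ih => simp [pvEnds, List.foldl] at ih ⊢; exact ih _

theorem pv_ends_length (edges : List (Int × Int)) : (pvEnds edges).length = 2 * edges.length := by
  induction edges with
  | nil => rfl
  | cons p t ih => simp [pvEnds] at ih ⊢; omega
theorem pv_insertBy_skip {α : Type} (bf : α → α → Bool) (x : α) (l r : List α)
    (h : ∀ y ∈ l, bf x y = false) :
    PySem.List.insertBy bf x (l ++ r) = l ++ PySem.List.insertBy bf x r := by
  induction l with
  | nil => rfl
  | cons a t ih =>
    have ha : bf x a = false := h a (by simp)
    simp only [List.cons_append, PySem.List.insertBy, ha, Bool.false_eq_true, if_false]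
    rw [ih (fun y hy => h y (by simp [hy]))]

theorem pv_insertBy_front {α : Type} (bf : α → α → Bool) (x : α) (r : List α)
    (h : ∀ y ∈ r, bf x y = true) :
    PySem.List.insertBy bf x r = x :: r := by
  cases r with
  | nil => rfl
  | cons a t => simp [PySem.List.insertBy, h a (by simp)]

theorem pv_sorted_append_singleton {α κ : Type} [LT κ] [DecidableLT κ]
    (xs : List α) (x : α) (key : α → κ) :
    PySem.List.sorted (xs ++ [x]) key false
      = PySem.List.insertBy (fun a b => decide (key a < key b)) x (PySem.List.sorted xs key false) := by
  rw [PySem.List.sorted_eq_foldl_insertBy, PySem.List.sorted_eq_foldl_insertBy, List.foldl_append]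
  rfl

theorem pv_sorted_eq_flatMap (key : Int → Int) (vs : List Int)
    (hvs : vs.Pairwise (· < ·)) (xs : List Int) (hcov : ∀ x ∈ xs, key x ∈ vs) :
    PySem.List.sorted xs key false
      = vs.flatMap (fun v => xs.filter (fun x => decide (key x = v))) := by
  induction xs using List.reverseRecOn with
  | nil => simp [PySem.List.sorted]
  | append_singleton t x ih =>
    have hxv : key x ∈ vs := hcov x (by simp)
    have hcov' : ∀ y ∈ t, key y ∈ vs := fun y hy => hcov y (by simp [hy])
    rw [pv_sorted_append_singleton, ih hcov']
    obtain ⟨v1, v2, rfl⟩ := List.append_of_mem hxv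
    have hp := (List.pairwise_append.mp hvs)
    have h1lt : ∀ a ∈ v1, a < key x := fun a ha => hp.2.2 a ha (key x) (by simp)
    have h2lt : ∀ b ∈ v2, key x < b := by
      have := List.pairwise_cons.mp hp.2.1
      exact fun b hb => this.1 b hb
    set F : Int → List Int := fun v => t.filter (fun y => decide (key y = v)) with hF
    have hsplit : (v1 ++ key x :: v2).flatMap F
        = v1.flatMap F ++ (F (key x) ++ v2.flatMap F) := by
      simp [List.flatMap_append]
    rw [hsplit, ← List.append_assoc]
    rw [pv_insertBy_skip _ _ (v1.flatMap F ++ F (key x)) _ (by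
      intro y hy
      rcases List.mem_append.mp hy with hy | hy
      · obtain ⟨v, hv, hyv⟩ := List.mem_flatMap.mp hy
        have := (List.mem_filter.mp hyv).2
        have hkey : key y = v := by simpa using this
        have : key y < key x := by rw [hkey]; exact h1lt v hv
        simp; omega
      · have := (List.mem_filter.mp hy).2
        have hkey : key y = key x := by simpa using this
        simp; omega)]
    rw [pv_insertBy_front _ _ _ (by
      intro y hy
      obtain ⟨v, hv, hyv⟩ := List.mem_flatMap.mp hy
      have := (List.mem_filter.mp hyv).2
      have hkey : key y = v := by simpa using this
      have : key x < key y := by rw [hkey]; exact h2lt v hv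
      simpa using this)]
    -- RHS
    have hF' : ∀ v : Int, (t ++ [x]).filter (fun y => decide (key y = v))
        = F v ++ (if key x = v then [x] else []) := by
      intro v
      rw [List.filter_append]
      congr 1
      by_cases h : key x = v <;> simp [h]
    have hR1 : v1.flatMap (fun v => (t ++ [x]).filter (fun y => decide (key y = v)))
        = v1.flatMap F := by
      apply List.flatMap_congr
      intro v hv
      rw [hF' v, if_neg (by have := h1lt v hv; omega)]
      simp
    have hR2 : v2.flatMap (fun v => (t ++ [x]).filter (fun y => decide (key y = v)))
        = v2.flatMap F := by
      apply List.flatMap_congr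
      intro v hv
      rw [hF' v, if_neg (by have := h2lt v hv; omega)]
      simp
    simp only [List.flatMap_append, List.flatMap_cons, hR1, hR2, hF' (key x), if_pos rfl]
    simp
theorem pv_buckets_eq (m1 : Nat) (kf : Int → Int) (l : List Int)
    (hk : ∀ x ∈ l, 0 ≤ kf x ∧ kf x < (m1 : Int)) :
    l.foldl (fun bs k =>
        PySem.List.pySetD bs (kf k) (PySem.List.pyGetD bs (kf k) [] ++ [k]))
      (List.replicate m1 ([] : List Int))
    = (PySem.List.pyRange 0 (m1 : Int) 1).map (fun d => l.filter (fun x => decide (kf x = d))) := by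
  induction l using List.reverseRecOn with
  | nil =>
    apply List.ext_getElem
    · simp [PySem.List.length_pyRange_one]
    · intro i h1 h2
      simp [PySem.List.getElem_pyRange_one]
  | append_singleton t x ih =>
    have hx := hk x (by simp)
    have ht : ∀ y ∈ t, 0 ≤ kf y ∧ kf y < (m1 : Int) := fun y hy => hk y (by simp [hy])
    rw [List.foldl_append, ih ht, List.foldl_cons, List.foldl_nil]
    have hnn : (0:Int) ≤ kf x := hx.1
    have hxn : (kf x).toNat < m1 := by omega
    have hlen : ((PySem.List.pyRange 0 (m1:Int) 1).map (fun d => t.filter (fun y => decide (kf y = d)))).length = m1 := by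
      simp [PySem.List.length_pyRange_one]
    rw [PySem.List.pySetD_of_nonneg _ _ hnn,
      PySem.List.pyGetD_eq_getElem _ _ hnn (by rw [hlen]; exact_mod_cast hx.2)]
    apply List.ext_getElem
    · simp [PySem.List.length_pyRange_one]
    · intro i h1 h2
      have hi : i < m1 := by simpa [PySem.List.length_pyRange_one] using h2
      simp only [List.getElem_set, List.getElem_map, PySem.List.getElem_pyRange_one, zero_add]
      have hfil : ∀ d : Int, (t ++ [x]).filter (fun y => decide (kf y = d))
          = t.filter (fun y => decide (kf y = d)) ++ (if kf x = d then [x] else []) := by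
        intro d
        rw [List.filter_append]
        congr 1
        by_cases h : kf x = d <;> simp [h]
      split_ifs with h
      · subst h
        have hxx : (((kf x).toNat : Nat) : Int) = kf x := Int.toNat_of_nonneg hnn
        rw [hxx, hfil, if_pos rfl]
      · rw [hfil, if_neg (by intro hc; apply h; omega)]
        simp
def pvRevDict (l : List Int) (s : Int) (d : PySem.Dict Int Int) : PySem.Dict Int Int :=
  (PySem.List.enumerate l s).foldl (fun d p => d.insert p.2 p.1) d

theorem pv_enum_fold_pair (vertices : List Int) (l : List Int) (s : Int)
    (d : PySem.Dict Int Int) (acc : List Int) :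
    (PySem.List.enumerate l s).foldl
      (fun (st : PySem.Dict Int Int × List Int) p =>
        (st.1.insert p.2 p.1, st.2 ++ [PySem.List.pyGetD vertices p.2 0])) (d, acc)
    = (pvRevDict l s d, acc ++ l.map (fun oi => PySem.List.pyGetD vertices oi 0)) := by
  induction l generalizing s d acc with
  | nil => simp [pvRevDict, PySem.List.enumerate_nil]
  | cons a t ih =>
    rw [PySem.List.enumerate_cons]
    simp only [List.foldl_cons]
    rw [ih]
    simp [pvRevDict, PySem.List.enumerate_cons]

theorem pv_revDict_not_mem (l : List Int) (s : Int) (d : PySem.Dict Int Int) (x : Int)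
    (hx : x ∉ l) : (pvRevDict l s d).getD x 0 = d.getD x 0 := by
  induction l generalizing s d with
  | nil => simp [pvRevDict, PySem.List.enumerate_nil]
  | cons a t ih =>
    have hxa : x ≠ a := fun h => hx (by simp [h])
    have hxt : x ∉ t := fun h => hx (by simp [h])
    simp only [pvRevDict, PySem.List.enumerate_cons, List.foldl_cons]
    rw [← pvRevDict, ih _ _ hxt, PySem.Dict.getD_insert_of_ne _ _ _ hxa]

theorem pv_revDict_getD (l : List Int) (s : Int) (d : PySem.Dict Int Int) (x : Int)
    (hx : x ∈ l) (hnd : l.Nodup) :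
    (pvRevDict l s d).getD x 0 = s + (l.idxOf x : Int) := by
  induction l generalizing s d with
  | nil => simp at hx
  | cons a t ih =>
    simp only [pvRevDict, PySem.List.enumerate_cons, List.foldl_cons]
    rw [← pvRevDict]
    rcases eq_or_ne x a with rfl | hne
    · have hxt : x ∉ t := (List.nodup_cons.mp hnd).1
      rw [pv_revDict_not_mem _ _ _ _ hxt, PySem.Dict.getD_insert_self]
      simp
    · have hxt : x ∈ t := by
        rcases List.mem_cons.mp hx with h | h
        · exact absurd h hne
        · exact h
      rw [ih _ _ hxt (List.nodup_cons.mp hnd).2]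
      rw [List.idxOf_cons_ne _ (Ne.symm hne)]
      push_cast
      ring
def pvRevList (l : List Int) (s : Int) (r : List Int) : List Int :=
  (PySem.List.enumerate l s).foldl (fun r p => PySem.List.pySetD r p.2 p.1) r

theorem pv_revList_length (l : List Int) (s : Int) (r : List Int)
    (hpos : ∀ y ∈ l, 0 ≤ y) : (pvRevList l s r).length = r.length := by
  induction l generalizing s r with
  | nil => simp [pvRevList, PySem.List.enumerate_nil]
  | cons a t ih =>
    simp only [pvRevList, PySem.List.enumerate_cons, List.foldl_cons]
    rw [← pvRevList, ih _ _ (fun y hy => hpos y (by simp [hy])),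
      PySem.List.pySetD_of_nonneg _ _ (hpos a (by simp)), List.length_set]

theorem pv_revList_not_touched (l : List Int) (s : Int) (r : List Int) (ix : Nat)
    (hpos : ∀ y ∈ l, 0 ≤ y) (h : ∀ y ∈ l, y.toNat ≠ ix) :
    (pvRevList l s r).getD ix 0 = r.getD ix 0 := by
  induction l generalizing s r with
  | nil => simp [pvRevList, PySem.List.enumerate_nil]
  | cons a t ih =>
    simp only [pvRevList, PySem.List.enumerate_cons, List.foldl_cons]
    rw [← pvRevList, ih _ _ (fun y hy => hpos y (by simp [hy])) (fun y hy => h y (by simp [hy])),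
      PySem.List.pySetD_of_nonneg _ _ (hpos a (by simp))]
    rw [List.getD_eq_getElem?_getD, List.getD_eq_getElem?_getD, List.getElem?_set]
    rw [if_neg (h a (by simp))]

theorem pv_revList_getD (l : List Int) (s : Int) (r : List Int) (x : Int)
    (hx : x ∈ l) (hnd : l.Nodup) (hpos : ∀ y ∈ l, 0 ≤ y)
    (hlen : ∀ y ∈ l, y.toNat < r.length) :
    (pvRevList l s r).getD x.toNat 0 = s + (l.idxOf x : Int) := by
  induction l generalizing s r with
  | nil => simp at hx
  | cons a t ih =>
    simp only [pvRevList, PySem.List.enumerate_cons, List.foldl_cons]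
    rw [← pvRevList, PySem.List.pySetD_of_nonneg _ _ (hpos a (by simp))]
    rcases eq_or_ne x a with rfl | hne
    · have hxt : x ∉ t := (List.nodup_cons.mp hnd).1
      have hne' : ∀ y ∈ t, y.toNat ≠ x.toNat := by
        intro y hy hc
        have h0y := hpos y (by simp [hy])
        have h0x := hpos x (by simp)
        have : y = x := by omega
        exact hxt (this ▸ hy)
      rw [pv_revList_not_touched _ _ _ _ (fun y hy => hpos y (by simp [hy])) hne']
      rw [List.getD_eq_getElem?_getD, List.getElem?_set,
        if_pos rfl, if_pos (hlen x (by simp))]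
      simp
    · have hxt : x ∈ t := by
        rcases List.mem_cons.mp hx with h | h
        · exact absurd h hne
        · exact h
      rw [ih _ _ hxt (List.nodup_cons.mp hnd).2 (fun y hy => hpos y (by simp [hy]))
        (by intro y hy; rw [List.length_set]; exact hlen y (by simp [hy]))]
      rw [List.idxOf_cons_ne _ (Ne.symm hne)]
      push_cast
      ring

-- ===== VERDICT (by name: the statement is the Claim_ definition above) =====
theorem sort_by_incidence_spec : Claim_equal_sort_by_incidence := by
  intro vertices edges _hdom hpre
  unfold Spec_sort_by_incidence sort_by_incidence sort_by_incidence_alt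
  simp only []
  set n := vertices.length with hn
  set E := pvEnds edges with hEdef
  -- bounds on endpoints
  have hEmem : ∀ v ∈ E, 0 ≤ v ∧ v < (n : Int) := by
    intro v hv
    rw [hEdef, pvEnds] at hv
    obtain ⟨p, hp, hvp⟩ := List.mem_flatMap.mp hv
    have := hpre p hp
    rcases List.mem_cons.mp hvp with rfl | hvp
    · exact ⟨this.1, this.2.1⟩
    · rcases List.mem_cons.mp hvp with rfl | hvp
      · exact ⟨this.2.2.1, this.2.2.2⟩
      · simp at hvp
  have hcnt_bound : ∀ v : Int, E.count v ≤ 2 * edges.length := by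
    intro v
    have h1 := List.count_le_length (a := v) (l := E)
    have h2 : E.length = 2 * edges.length := by rw [hEdef]; exact pv_ends_length edges
    omega
  set m1 : Nat := 2 * edges.length + 1 with hm1
  -- A's incidence dict is the endpoint counter
  have hinc : ∀ v : Int, (edges.foldl (fun d p =>
      let d1 := d.insert p.1 (d.getD p.1 0 + 1)
      d1.insert p.2 (d1.getD p.2 0 + 1)) PySem.Dict.empty).getD v 0 = ((E.count v : Nat) : Int) := by
    intro v
    rw [pv_incidence_getD, hEdef]
    simp [PySem.Dict.getD_empty]
  simp only [hinc]
  -- B's degree array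
  rw [pv_fold_pair edges (fun dg x => PySem.List.pySetD dg x (PySem.List.pyGetD dg x 0 + 1)),
    ← hEdef, pv_deg_eq n E hEmem]
  -- the bucket key reads off the degree array
  set kf : Int → Int := fun k => PySem.List.pyGetD ((PySem.List.pyRange 0 (n : Int) 1).map (fun k => ((E.count k : Nat) : Int))) k 0 with hkf
  have hkf_eq : ∀ x : Int, 0 ≤ x → x < (n : Int) → kf x = ((E.count x : Nat) : Int) := by
    intro x h0 h1
    rw [hkf]
    exact PySem.List.pyGetD_map_pyRange_of_nonneg _ _ _ _ h0 h1
  have hk : ∀ x ∈ PySem.List.pyRange 0 (n : Int) 1, 0 ≤ kf x ∧ kf x < (m1 : Int) := by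
    intro x hx
    obtain ⟨h0, h1⟩ := PySem.List.mem_pyRange_one.mp hx
    rw [hkf_eq x h0 h1]
    have := hcnt_bound x
    constructor
    · positivity
    · rw [hm1]; push_cast; omega
  rw [pv_buckets_eq m1 kf (PySem.List.pyRange 0 (n : Int) 1) hk]
  -- A's sort, as the concatenation of the degree buckets
  have hcov : ∀ x ∈ PySem.List.pyRange 0 (n : Int) 1,
      (fun i : Int => ((E.count i : Nat) : Int)) x ∈ PySem.List.pyRange 0 (m1 : Int) 1 := by
    intro x _
    refine PySem.List.mem_pyRange_one.mpr ⟨by positivity, ?_⟩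
    have := hcnt_bound x
    rw [hm1]; push_cast; omega
  rw [pv_sorted_eq_flatMap (fun i : Int => ((E.count i : Nat) : Int))
    (PySem.List.pyRange 0 (m1 : Int) 1) (PySem.List.pairwise_lt_pyRange_one 0 (m1 : Int))
    (PySem.List.pyRange 0 (n : Int) 1) hcov]
  -- B's flattened buckets equal A's bucket concatenation
  have hflat : (((PySem.List.pyRange 0 (m1 : Int) 1).map
        (fun d => (PySem.List.pyRange 0 (n : Int) 1).filter (fun x => decide (kf x = d)))).flatMap id)
      = (PySem.List.pyRange 0 (m1 : Int) 1).flatMap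
        (fun v => (PySem.List.pyRange 0 (n : Int) 1).filter (fun x => decide (((E.count x : Nat) : Int) = v))) := by
    rw [List.flatMap_map]
    apply List.flatMap_congr
    intro v _
    simp only [id, Function.comp]
    apply List.filter_congr
    intro x hx
    obtain ⟨h0, h1⟩ := PySem.List.mem_pyRange_one.mp hx
    rw [hkf_eq x h0 h1]
  rw [hflat]
  set ord : List Int := (PySem.List.pyRange 0 (m1 : Int) 1).flatMap
      (fun v => (PySem.List.pyRange 0 (n : Int) 1).filter (fun x => decide (((E.count x : Nat) : Int) = v))) with hord
  -- ord is a permutation of range(n)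
  have hperm : ord.Perm (PySem.List.pyRange 0 (n : Int) 1) := by
    rw [hord, ← pv_sorted_eq_flatMap (fun i : Int => ((E.count i : Nat) : Int))
      (PySem.List.pyRange 0 (m1 : Int) 1) (PySem.List.pairwise_lt_pyRange_one 0 (m1 : Int))
      (PySem.List.pyRange 0 (n : Int) 1) hcov]
    exact PySem.List.sorted_perm _ _ _
  have hnd : ord.Nodup := hperm.nodup_iff.mpr (PySem.List.nodup_pyRange_one 0 (n : Int))
  have hmemord : ∀ x : Int, 0 ≤ x → x < (n : Int) → x ∈ ord := by
    intro x h0 h1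
    exact hperm.mem_iff.mpr (PySem.List.mem_pyRange_one.mpr ⟨h0, h1⟩)
  have hposord : ∀ y ∈ ord, 0 ≤ y := by
    intro y hy
    exact (PySem.List.mem_pyRange_one.mp (hperm.mem_iff.mp hy)).1
  have hltord : ∀ y ∈ ord, y < (n : Int) := by
    intro y hy
    exact (PySem.List.mem_pyRange_one.mp (hperm.mem_iff.mp hy)).2
  clear_value ord
  rw [pv_enum_fold_pair vertices ord 0 PySem.Dict.empty []]
  simp only [List.nil_append]
  rw [PySem.List.foldl_append_singleton_eq_map
    (fun p : Int × Int => ((pvRevDict ord 0 PySem.Dict.empty).getD p.1 0,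
      (pvRevDict ord 0 PySem.Dict.empty).getD p.2 0)) edges []]
  simp only [List.nil_append]
  refine Prod.ext rfl ?_
  simp only []
  apply List.map_congr_left
  intro p hp
  obtain ⟨h10, h11, h20, h21⟩ := hpre p hp
  have hrevlist : List.foldl (fun r p => PySem.List.pySetD r p.2 p.1)
      (List.replicate n 0) (PySem.List.enumerate ord) = pvRevList ord 0 (List.replicate n 0) := rfl
  rw [hrevlist]
  have hlenrev : (pvRevList ord 0 (List.replicate n (0 : Int))).length = n := by
    rw [pv_revList_length ord 0 _ hposord, List.length_replicate]
  have hget : ∀ x : Int, 0 ≤ x → x < (n : Int) →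
      PySem.List.pyGetD (pvRevList ord 0 (List.replicate n (0 : Int))) x 0 = ((ord.idxOf x : Nat) : Int) := by
    intro x h0 h1
    rw [PySem.List.pyGetD_eq_getElem _ _ h0 (by rw [hlenrev]; exact h1),
      ← List.getD_eq_getElem _ 0 (by rw [hlenrev]; omega)]
    rw [pv_revList_getD ord 0 _ x (hmemord x h0 h1) hnd hposord
      (by intro y hy; rw [List.length_replicate]; have := hltord y hy; have := hposord y hy; omega)]
    simp
  have hgetd : ∀ x : Int, 0 ≤ x → x < (n : Int) →
      (pvRevDict ord 0 PySem.Dict.empty).getD x 0 = ((ord.idxOf x : Nat) : Int) := by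
    intro x h0 h1
    rw [pv_revDict_getD ord 0 _ x (hmemord x h0 h1) hnd]
    simp
  rw [hget p.1 h10 h11, hget p.2 h20 h21, hgetd p.1 h10 h11, hgetd p.2 h20 h21]
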